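-- pv_equiv track=rewrite | github.com/wzygxr/shuati | class091_IntervalDynamicProgramming/Code11_PalindromeRemoval.py | minimumMovesOptimized
-- ===== SOURCE A (Python) =====
-- from typing import List
--
-- def minimumMovesOptimized(arr: List[int]) -> int:
--     """
--     优化版本
--     时间复杂度：O(n^3)
--     空间复杂度：O(n^2)
--     """
--     n = len(arr)
--     if n == 0:
--         return 0
--
--     dp = [[10**9] * n for _ in range(n)]
--
--     # 初始化
--     for i in range(n):
--         dp[i][i] = 1
--
--     for length in range(2, n + 1):
--         for i in range(n - length + 1):
--             j = i + length - 1
--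
--             # 默认情况：单独删除第一个元素
--             dp[i][j] = dp[i + 1][j] + 1
--
--             # 如果arr[i] == arr[k]，可以考虑一起删除
--             for k in range(i + 1, j + 1):
--                 if arr[i] == arr[k]:
--                     left = dp[i + 1][k - 1] if i + 1 <= k - 1 else 0
--                     right = dp[k + 1][j] if k + 1 <= j else 0
--                     cost = left + right
--                     if left == 0 and right == 0:
--                         cost = 1
--                     dp[i][j] = min(dp[i][j], cost)
--
--     return int(dp[0][n - 1])
-- ===== SOURCE B (Python) =====
-- from typing import List
--
-- def minimumMovesOptimized(arr: List[int]) -> int: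
--     """Top-down memoized recursion over intervals instead of the bottom-up table."""
--     memo = {}
--
--     def solve(i, j):
--         if i > j:
--             return 0
--         if i == j:
--             return 1
--         key = (i, j)
--         if key in memo:
--             return memo[key]
--         best = 1 + solve(i + 1, j)
--         for k in range(i + 1, j + 1):
--             if arr[i] == arr[k]:
--                 left = solve(i + 1, k - 1)
--                 right = solve(k + 1, j)
--                 cost = left + right
--                 if left == 0 and right == 0:
--                     cost = 1
--                 best = min(best, cost)
--         memo[key] = best
--         return best
--
--     return solve(0, len(arr) - 1)
-- ===== Notes on version B (the rewrite author's own statement) =====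
-- stated objective: alternative
-- what changed: Replaces the bottom-up O(n^2) DP table filled by three nested length/start/split loops with a top-down memoized recursion solve(i,j) over intervals.
import Mathlib
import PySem

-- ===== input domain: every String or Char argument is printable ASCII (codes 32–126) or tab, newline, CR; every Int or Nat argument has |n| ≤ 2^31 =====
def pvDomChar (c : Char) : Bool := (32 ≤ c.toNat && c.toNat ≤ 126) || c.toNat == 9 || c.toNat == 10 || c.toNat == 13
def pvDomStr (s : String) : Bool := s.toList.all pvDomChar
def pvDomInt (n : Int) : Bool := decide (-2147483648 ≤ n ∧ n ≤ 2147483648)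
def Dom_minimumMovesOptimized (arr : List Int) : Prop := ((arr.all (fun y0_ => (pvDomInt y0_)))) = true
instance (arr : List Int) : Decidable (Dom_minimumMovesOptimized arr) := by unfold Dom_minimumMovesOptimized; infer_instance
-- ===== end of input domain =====

-- B replaces A's bottom-up interval-DP table with a top-down memoized recursion over intervals (objective: alternative decomposition, same results).

-- ===== PORT A =====
-- dp[i][j] read/write helpers; every index A uses is in range, where List.getD/List.set are exact
def pvGet2 (dp : List (List Int)) (i j : Nat) : Int := (dp.getD i []).getD j 0

def pvSet2 (dp : List (List Int)) (i j : Nat) (v : Int) : List (List Int) :=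
  dp.set i ((dp.getD i []).set j v)

-- one iteration of A's inner `for k in range(i+1, j+1)` loop, with k = i+1+t
def pvStepA (arr : List Int) (i j : Nat) (dp : List (List Int)) (t : Nat) : List (List Int) :=
  let k := i + 1 + t
  if arr.getD i 0 = arr.getD k 0 then
    let left := if i + 1 ≤ k - 1 then pvGet2 dp (i + 1) (k - 1) else 0
    let right := if k + 1 ≤ j then pvGet2 dp (k + 1) j else 0
    let cost := if left = 0 ∧ right = 0 then (1 : Int) else left + right
    pvSet2 dp i j (min (pvGet2 dp i j) cost)
  else dp

def pvInnerA (arr : List Int) (i j : Nat) (dp : List (List Int)) : List (List Int) :=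
  (List.range (j - i)).foldl (pvStepA arr i j) dp

def minimumMovesOptimized (arr : List Int) : Int :=
  let n := arr.length
  if n = 0 then 0
  else
    let dp : List (List Int) := List.replicate n (List.replicate n ((10 : Int) ^ 9))
    let dp := (List.range n).foldl (fun dp i => pvSet2 dp i i 1) dp
    -- `for length in range(2, n+1)` with length = d + 2
    let dp := (List.range (n - 1)).foldl (fun dp d =>
      (List.range (n - (d + 2) + 1)).foldl (fun dp i =>
        pvInnerA arr i (i + (d + 2) - 1)
          (pvSet2 dp i (i + (d + 2) - 1) (pvGet2 dp (i + 1) (i + (d + 2) - 1) + 1))) dp) dp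
    pvGet2 dp 0 (n - 1)

-- ===== PORT B =====
-- Source B's solve(i, j); the memo dict is a pure cache, the recursion itself is ported directly
def pvSolve (arr : List Int) (i j : Int) : Int :=
  if h1 : i > j then 0
  else if h2 : i = j then 1
  else
    (List.range (j - i).toNat).attach.foldl (fun best t =>
      let k := i + 1 + (t.1 : Int)
      if PySem.List.pyGetD arr i 0 = PySem.List.pyGetD arr k 0 then
        let left := pvSolve arr (i + 1) (k - 1)
        let right := pvSolve arr (k + 1) j
        let cost := if left = 0 ∧ right = 0 then (1 : Int) else left + right
        min best cost
      else best) (1 + pvSolve arr (i + 1) j)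
termination_by (j - i).toNat
decreasing_by
  all_goals first
    | (have ht := t.2; simp only [List.mem_range] at ht; omega)
    | omega

def minimumMovesOptimized_alt (arr : List Int) : Int :=
  pvSolve arr 0 ((arr.length : Int) - 1)

-- ===== PRECONDITION & SPEC =====
def Spec_minimumMovesOptimized (arr : List Int) (out : Int) : Prop := out = minimumMovesOptimized_alt arr
instance (arr : List Int) (out : Int) : Decidable (Spec_minimumMovesOptimized arr out) := by unfold Spec_minimumMovesOptimized; infer_instance

-- ===== CLAIM (what is proved, stated in full; the proofs are below) =====
def Claim_equal_minimumMovesOptimized : Prop := ∀ (arr : List Int), Dom_minimumMovesOptimized arr → Spec_minimumMovesOptimized arr (minimumMovesOptimized arr)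

-- ===== LEMMAS AND PROOFS =====

def pvShape (n : Nat) (dp : List (List Int)) : Prop :=
  dp.length = n ∧ ∀ r ∈ dp, r.length = n

-- the cost A computes for a split at k, written in terms of B's recursion
def pvCostN (arr : List Int) (i j k : Nat) : Int :=
  let left := pvSolve arr ((i : Int) + 1) ((k : Int) - 1)
  let right := pvSolve arr ((k : Int) + 1) (j : Int)
  if left = 0 ∧ right = 0 then 1 else left + right

-- B's inner fold, re-indexed over Nat
def pvFoldB (arr : List Int) (i j : Nat) (v : Int) (m : Nat) : Int :=
  (List.range m).foldl (fun best t =>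
    let k := i + 1 + t
    if arr.getD i 0 = arr.getD k 0 then min best (pvCostN arr i j k) else best) v

-- the table invariant: all cells of width ≤ W hold B's value
def pvCorr (arr : List Int) (W : Nat) (dp : List (List Int)) : Prop :=
  ∀ i j : Nat, i ≤ j → j < arr.length → j + 1 - i ≤ W → pvGet2 dp i j = pvSolve arr i j

lemma pvGetD_set_self {α : Type} (l : List α) (i : Nat) (v d : α) (h : i < l.length) :
    (l.set i v).getD i d = v := by
  rw [List.getD_eq_getElem?_getD, List.getElem?_set_self h]; rfl

lemma pvGetD_set_ne {α : Type} (l : List α) (i j : Nat) (v d : α) (h : i ≠ j) :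
    (l.set i v).getD j d = l.getD j d := by
  rw [List.getD_eq_getElem?_getD, List.getElem?_set_ne h, ← List.getD_eq_getElem?_getD]

lemma pvGetD_mem {α : Type} (l : List α) (i : Nat) (d : α) (h : i < l.length) :
    l.getD i d ∈ l := by
  rw [List.getD_eq_getElem?_getD, List.getElem?_eq_getElem h]
  exact List.getElem_mem _

lemma pvShape_set2 (n : Nat) (dp : List (List Int)) (i j : Nat) (v : Int)
    (h : pvShape n dp) : pvShape n (pvSet2 dp i j v) := by
  obtain ⟨h1, h2⟩ := h
  by_cases hi : i < dp.length
  · refine ⟨by simp [pvSet2, h1], ?_⟩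
    intro r hr
    rcases List.mem_or_eq_of_mem_set hr with h | h
    · exact h2 r h
    · subst h
      rw [List.length_set]
      exact h2 _ (pvGetD_mem _ _ _ hi)
  · rw [pvSet2, List.set_eq_of_length_le (by omega)]
    exact ⟨h1, h2⟩

lemma pvGet2_set2_self (n : Nat) (dp : List (List Int)) (i j : Nat) (v : Int)
    (h : pvShape n dp) (hi : i < n) (hj : j < n) :
    pvGet2 (pvSet2 dp i j v) i j = v := by
  obtain ⟨h1, h2⟩ := h
  have hi' : i < dp.length := by omega
  have hrow : (dp.getD i []).length = n := h2 _ (pvGetD_mem _ _ _ hi')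
  rw [pvGet2, pvSet2, pvGetD_set_self _ _ _ _ hi', pvGetD_set_self _ _ _ _ (by omega)]

lemma pvGet2_set2_ne (dp : List (List Int)) (a b i j : Nat) (v : Int)
    (h : ¬(i = a ∧ j = b)) : pvGet2 (pvSet2 dp a b v) i j = pvGet2 dp i j := by
  by_cases hia : i = a
  · subst hia
    have hjb : j ≠ b := by tauto
    by_cases hi : i < dp.length
    · rw [pvGet2, pvSet2, pvGetD_set_self _ _ _ _ hi, pvGetD_set_ne _ _ _ _ _ (Ne.symm hjb)]
      rfl
    · rw [pvSet2, List.set_eq_of_length_le (by omega)]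
  · rw [pvGet2, pvSet2, pvGetD_set_ne _ _ _ _ _ (Ne.symm hia)]
    rfl

lemma pvInit_spec (arr : List Int) (n : Nat) (hn : n = arr.length) (m : Nat) (hm : m ≤ n)
    (dp : List (List Int)) (hsh : pvShape n dp) :
    pvShape n ((List.range m).foldl (fun dp i => pvSet2 dp i i 1) dp)
    ∧ ∀ a b : Nat, pvGet2 ((List.range m).foldl (fun dp i => pvSet2 dp i i 1) dp) a b
        = if a = b ∧ a < m then 1 else pvGet2 dp a b := by
  induction m with
  | zero => simpa using hsh
  | succ m ih =>
    obtain ⟨ihsh, ihget⟩ := ih (by omega)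
    rw [List.range_succ, List.foldl_append]
    refine ⟨pvShape_set2 _ _ _ _ _ ihsh, ?_⟩
    intro a b
    simp only [List.foldl_cons, List.foldl_nil]
    by_cases hab : a = m ∧ b = m
    · obtain ⟨rfl, rfl⟩ := hab
      rw [pvGet2_set2_self n _ _ _ _ ihsh (by omega) (by omega)]
      simp
    · rw [pvGet2_set2_ne _ _ _ _ _ _ hab, ihget a b]
      have : (a = b ∧ a < m + 1) ↔ (a = b ∧ a < m) := by
        constructor
        · rintro ⟨rfl, h2⟩
          refine ⟨rfl, ?_⟩
          rcases Nat.lt_succ_iff_lt_or_eq.mp h2 with h3 | h3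
          · exact h3
          · exact absurd ⟨h3, h3⟩ hab
        · rintro ⟨rfl, h2⟩; exact ⟨rfl, by omega⟩
      rw [if_congr this rfl rfl]

lemma pvSolve_gt (arr : List Int) (i j : Int) (h : i > j) : pvSolve arr i j = 0 := by
  rw [pvSolve]; simp [h]

lemma pvSolve_refl (arr : List Int) (i : Int) : pvSolve arr i i = 1 := by
  rw [pvSolve]; simp

lemma pvSolve_lt (arr : List Int) (i j : Nat) (hij : i < j) :
    pvSolve arr (i : Int) (j : Int)
      = pvFoldB arr i j (1 + pvSolve arr ((i : Int) + 1) (j : Int)) (j - i) := by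
  rw [pvSolve, dif_neg (by omega), dif_neg (by omega)]
  have ha := List.foldl_attach (l := List.range ((j : Int) - (i : Int)).toNat)
    (f := fun (best : Int) (t : Nat) =>
      if PySem.List.pyGetD arr (i : Int) 0 = PySem.List.pyGetD arr ((i : Int) + 1 + (t : Int)) 0 then
        min best (if pvSolve arr ((i : Int) + 1) ((i : Int) + 1 + (t : Int) - 1) = 0
              ∧ pvSolve arr ((i : Int) + 1 + (t : Int) + 1) (j : Int) = 0 then 1
          else pvSolve arr ((i : Int) + 1) ((i : Int) + 1 + (t : Int) - 1)
            + pvSolve arr ((i : Int) + 1 + (t : Int) + 1) (j : Int))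
      else best)
    (b := 1 + pvSolve arr ((i : Int) + 1) (j : Int))
  refine ha.trans ?_
  have hji : ((j : Int) - (i : Int)).toNat = j - i := by omega
  rw [hji, pvFoldB]
  apply PySem.List.foldl_congr_mem
  intro best t ht
  simp only [List.mem_range] at ht
  have hk : (i : Int) + 1 + (t : Int) = ((i + 1 + t : Nat) : Int) := by push_cast; ring
  simp only [hk, PySem.List.pyGetD_natCast, pvCostN]

lemma pvFoldB_succ (arr : List Int) (i j : Nat) (v : Int) (m : Nat) :
    pvFoldB arr i j v (m + 1)
      = if arr.getD i 0 = arr.getD (i + 1 + m) 0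
        then min (pvFoldB arr i j v m) (pvCostN arr i j (i + 1 + m))
        else pvFoldB arr i j v m := by
  simp only [pvFoldB, List.range_succ, List.foldl_append, List.foldl_cons, List.foldl_nil]

lemma pvInnerA_spec (arr : List Int) (n : Nat) (hn : n = arr.length)
    (i j : Nat) (hij : i < j) (hjn : j < n) (dp : List (List Int))
    (hsh : pvShape n dp)
    (hsmall : ∀ a b : Nat, a ≤ b → b < n → b - a < j - i → pvGet2 dp a b = pvSolve arr a b)
    (m : Nat) (hm : m ≤ j - i) :
    pvGet2 ((List.range m).foldl (pvStepA arr i j) dp) i j = pvFoldB arr i j (pvGet2 dp i j) m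
    ∧ (∀ a b : Nat, ¬(a = i ∧ b = j) →
        pvGet2 ((List.range m).foldl (pvStepA arr i j) dp) a b = pvGet2 dp a b)
    ∧ pvShape n ((List.range m).foldl (pvStepA arr i j) dp) := by
  subst hn
  induction m with
  | zero => exact ⟨rfl, fun a b _ => rfl, hsh⟩
  | succ m ih =>
    obtain ⟨ih1, ih2, ih3⟩ := ih (by omega)
    rw [List.range_succ, List.foldl_append, List.foldl_cons, List.foldl_nil]
    set dpm := (List.range m).foldl (pvStepA arr i j) dp with hdpm
    rw [pvFoldB_succ]
    simp only [pvStepA]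
    by_cases hc : arr.getD i 0 = arr.getD (i + 1 + m) 0
    · simp only [if_pos hc]
      have hcost :
          (if (if i + 1 ≤ i + 1 + m - 1 then pvGet2 dpm (i + 1) (i + 1 + m - 1) else 0) = 0
              ∧ (if i + 1 + m + 1 ≤ j then pvGet2 dpm (i + 1 + m + 1) j else 0) = 0 then (1 : Int)
            else (if i + 1 ≤ i + 1 + m - 1 then pvGet2 dpm (i + 1) (i + 1 + m - 1) else 0)
              + (if i + 1 + m + 1 ≤ j then pvGet2 dpm (i + 1 + m + 1) j else 0))
          = pvCostN arr i j (i + 1 + m) := by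
        have hleft : (if i + 1 ≤ i + 1 + m - 1 then pvGet2 dpm (i + 1) (i + 1 + m - 1) else 0)
            = pvSolve arr ((i : Int) + 1) (((i + 1 + m : Nat) : Int) - 1) := by
          rcases Nat.eq_zero_or_pos m with hm0 | hm0
          · subst hm0
            rw [if_neg (by omega), pvSolve_gt _ _ _ (by push_cast; omega)]
          · rw [if_pos (by omega), ih2 _ _ (by omega),
              hsmall _ _ (by omega) (by omega) (by omega)]
            congr 1 <;> omega
        have hright : (if i + 1 + m + 1 ≤ j then pvGet2 dpm (i + 1 + m + 1) j else 0)
            = pvSolve arr (((i + 1 + m : Nat) : Int) + 1) ((j : Nat) : Int) := by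
          by_cases hkj : i + 1 + m + 1 ≤ j
          · rw [if_pos hkj, ih2 _ _ (by omega),
              hsmall _ _ (by omega) (by omega) (by omega)]
            congr 1 <;> omega
          · rw [if_neg hkj, pvSolve_gt _ _ _ (by push_cast; omega)]
        rw [pvCostN, hleft, hright]
      rw [hcost]
      refine ⟨?_, ?_, pvShape_set2 _ _ _ _ _ ih3⟩
      · rw [pvGet2_set2_self arr.length _ _ _ _ ih3 (by omega) hjn, ih1]
      · intro a b hab
        rw [pvGet2_set2_ne _ _ _ _ _ _ hab, ih2 _ _ hab]
    · simp only [if_neg hc]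
      exact ⟨ih1, ih2, ih3⟩

lemma pvBody_spec (arr : List Int) (n : Nat) (hn : n = arr.length)
    (L i j : Nat) (hL : 2 ≤ L) (hj : j = i + L - 1) (hjn : j < n)
    (dp : List (List Int)) (hsh : pvShape n dp) (hC : pvCorr arr (L - 1) dp) :
    pvGet2 (pvInnerA arr i j (pvSet2 dp i j (pvGet2 dp (i + 1) j + 1))) i j = pvSolve arr i j
    ∧ (∀ a b : Nat, ¬(a = i ∧ b = j) →
        pvGet2 (pvInnerA arr i j (pvSet2 dp i j (pvGet2 dp (i + 1) j + 1))) a b = pvGet2 dp a b)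
    ∧ pvShape n (pvInnerA arr i j (pvSet2 dp i j (pvGet2 dp (i + 1) j + 1))) := by
  subst hn
  have hij : i < j := by omega
  have hin : i < arr.length := by omega
  set dp1 := pvSet2 dp i j (pvGet2 dp (i + 1) j + 1) with hdp1
  have hsh1 : pvShape arr.length dp1 := pvShape_set2 _ _ _ _ _ hsh
  have hsmall : ∀ a b : Nat, a ≤ b → b < arr.length → b - a < j - i → pvGet2 dp1 a b = pvSolve arr a b := by
    intro a b hab hbn hw
    rw [hdp1, pvGet2_set2_ne _ _ _ _ _ _ (by rintro ⟨rfl, rfl⟩; omega)]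
    exact hC a b hab hbn (by omega)
  obtain ⟨s1, s2, s3⟩ := pvInnerA_spec arr arr.length rfl i j hij hjn dp1 hsh1 hsmall (j - i) le_rfl
  rw [pvInnerA] at *
  refine ⟨?_, ?_, s3⟩
  · rw [s1, hdp1, pvGet2_set2_self arr.length _ _ _ _ hsh (by omega) hjn]
    have hstart : pvGet2 dp (i + 1) j = pvSolve arr ((i : Int) + 1) (j : Int) := by
      rw [hC (i + 1) j (by omega) hjn (by omega)]
      congr 1 <;> omega
    rw [hstart, pvSolve_lt arr i j hij, add_comm]
  · intro a b hab
    rw [s2 _ _ hab, hdp1, pvGet2_set2_ne _ _ _ _ _ _ hab]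

lemma pvILoop_spec (arr : List Int) (n : Nat) (hn : n = arr.length)
    (L : Nat) (hL : 2 ≤ L) (hLn : L ≤ n)
    (dp : List (List Int)) (hsh : pvShape n dp) (hC : pvCorr arr (L - 1) dp)
    (m : Nat) (hm : m ≤ n - L + 1) :
    pvShape n ((List.range m).foldl (fun dp i =>
        pvInnerA arr i (i + L - 1) (pvSet2 dp i (i + L - 1) (pvGet2 dp (i + 1) (i + L - 1) + 1))) dp)
    ∧ (∀ a b : Nat, a ≤ b → b < n →
        pvGet2 ((List.range m).foldl (fun dp i =>
          pvInnerA arr i (i + L - 1) (pvSet2 dp i (i + L - 1) (pvGet2 dp (i + 1) (i + L - 1) + 1))) dp) a b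
        = if b = a + L - 1 ∧ a < m then pvSolve arr a b else pvGet2 dp a b) := by
  subst hn
  induction m with
  | zero =>
    refine ⟨hsh, ?_⟩
    intro a b _ _
    simp
  | succ m ih =>
    obtain ⟨ihsh, ihget⟩ := ih (by omega)
    rw [List.range_succ, List.foldl_append, List.foldl_cons, List.foldl_nil]
    set dpm := (List.range m).foldl (fun dp i =>
      pvInnerA arr i (i + L - 1) (pvSet2 dp i (i + L - 1) (pvGet2 dp (i + 1) (i + L - 1) + 1))) dp
      with hdpm
    have hCm : pvCorr arr (L - 1) dpm := by
      intro a b hab hbn hw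
      rw [ihget a b hab hbn, if_neg (by rintro ⟨rfl, _⟩; omega)]
      exact hC a b hab hbn hw
    obtain ⟨b1, b2, b3⟩ := pvBody_spec arr arr.length rfl L m (m + L - 1) hL rfl
      (by omega) dpm ihsh hCm
    refine ⟨b3, ?_⟩
    intro a b hab hbn
    by_cases hmb : a = m ∧ b = m + L - 1
    · obtain ⟨rfl, rfl⟩ := hmb
      rw [b1, if_pos ⟨by omega, by omega⟩]
    · rw [b2 _ _ hmb, ihget a b hab hbn]
      by_cases h1 : b = a + L - 1 ∧ a < m
      · rw [if_pos h1, if_pos ⟨h1.1, by omega⟩]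
      · rw [if_neg h1, if_neg (by rintro ⟨rfl, h2⟩; exact h1 ⟨rfl, by omega⟩)]

lemma pvOuter_spec (arr : List Int) (n : Nat) (hn : n = arr.length)
    (dp : List (List Int)) (hsh : pvShape n dp) (hC : pvCorr arr 1 dp)
    (m : Nat) (hm : m ≤ n - 1) :
    pvShape n ((List.range m).foldl (fun dp d =>
        (List.range (n - (d + 2) + 1)).foldl (fun dp i =>
          pvInnerA arr i (i + (d + 2) - 1) (pvSet2 dp i (i + (d + 2) - 1) (pvGet2 dp (i + 1) (i + (d + 2) - 1) + 1))) dp) dp)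
    ∧ pvCorr arr (m + 1) ((List.range m).foldl (fun dp d =>
        (List.range (n - (d + 2) + 1)).foldl (fun dp i =>
          pvInnerA arr i (i + (d + 2) - 1) (pvSet2 dp i (i + (d + 2) - 1) (pvGet2 dp (i + 1) (i + (d + 2) - 1) + 1))) dp) dp) := by
  subst hn
  induction m with
  | zero => exact ⟨hsh, hC⟩
  | succ m ih =>
    obtain ⟨ihsh, ihC⟩ := ih (by omega)
    rw [List.range_succ, List.foldl_append, List.foldl_cons, List.foldl_nil]
    set dpm := (List.range m).foldl (fun dp d =>
        (List.range (arr.length - (d + 2) + 1)).foldl (fun dp i =>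
          pvInnerA arr i (i + (d + 2) - 1) (pvSet2 dp i (i + (d + 2) - 1) (pvGet2 dp (i + 1) (i + (d + 2) - 1) + 1))) dp) dp
      with hdpm
    have hCm : pvCorr arr ((m + 2) - 1) dpm := by
      intro a b hab hbn hw
      exact ihC a b hab hbn (by omega)
    obtain ⟨l1, l2⟩ := pvILoop_spec arr arr.length rfl (m + 2) (by omega) (by omega)
      dpm ihsh hCm (arr.length - (m + 2) + 1) le_rfl
    refine ⟨l1, ?_⟩
    intro a b hab hbn hw
    rw [l2 a b hab hbn]
    by_cases h1 : b = a + (m + 2) - 1 ∧ a < arr.length - (m + 2) + 1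
    · rw [if_pos h1]
    · rw [if_neg h1]
      exact ihC a b hab hbn (by
        rcases Nat.lt_or_ge (b + 1 - a) (m + 2) with h2 | h2
        · omega
        · exfalso; exact h1 ⟨by omega, by omega⟩)

-- ===== VERDICT (by name: the statement is the Claim_ definition above) =====
theorem minimumMovesOptimized_spec : Claim_equal_minimumMovesOptimized := by
  intro arr _
  unfold Spec_minimumMovesOptimized minimumMovesOptimized minimumMovesOptimized_alt
  by_cases h0 : arr.length = 0
  · simp only [h0, if_pos rfl, if_true]
    rw [pvSolve_gt arr 0 (((0 : Nat) : Int) - 1) (by omega)]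
  · simp only [if_neg h0]
    have hn : 0 < arr.length := Nat.pos_of_ne_zero h0
    have hsh0 : pvShape arr.length (List.replicate arr.length (List.replicate arr.length ((10 : Int) ^ 9))) := by
      refine ⟨List.length_replicate, ?_⟩
      intro r hr
      rw [List.eq_of_mem_replicate hr]
      exact List.length_replicate
    obtain ⟨ish, iget⟩ := pvInit_spec arr arr.length rfl arr.length le_rfl _ hsh0
    have hC1 : pvCorr arr 1
        ((List.range arr.length).foldl (fun dp i => pvSet2 dp i i 1)
          (List.replicate arr.length (List.replicate arr.length ((10 : Int) ^ 9)))) := by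
      intro a b hab hbn hw
      have hab' : a = b := by omega
      subst hab'
      rw [iget a a, if_pos ⟨rfl, hbn⟩, pvSolve_refl]
    obtain ⟨osh, oC⟩ := pvOuter_spec arr arr.length rfl _ ish hC1 (arr.length - 1) le_rfl
    rw [oC 0 (arr.length - 1) (by omega) (by omega) (by omega)]
    congr 1
    push_cast [h0]
    omega
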